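-- pv_equiv track=rewrite | github.com/ganeshmalepati/Random | Learn_about_strings.py | Vowels_in_String
-- ===== SOURCE A (Python) =====
-- def Vowels_in_String(s):
--     vowels = ('aeiouAEIOU')
--     count = 0
--     found_vowels = set()
--     for char in s:
--         if char in vowels:
--             count += 1
--             found_vowels.add(char)
--     return count, found_vowels
-- ===== SOURCE B (Python) =====
-- def Vowels_in_String(s):
--     vowels = 'aeiouAEIOU'
--     found_vowels = set(s) & set(vowels)
--     count = sum(s.count(v) for v in found_vowels)
--     return count, found_vowels
-- ===== Notes on version B (the rewrite author's own statement) =====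
-- stated objective: faster
-- what changed: Replaces the single per-character accumulating loop with an index-first decomposition: the distinct present vowels come from set(s) & set(vowels), and the count from summing s.count(v) over those (at most 10) vowels.
import Mathlib
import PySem

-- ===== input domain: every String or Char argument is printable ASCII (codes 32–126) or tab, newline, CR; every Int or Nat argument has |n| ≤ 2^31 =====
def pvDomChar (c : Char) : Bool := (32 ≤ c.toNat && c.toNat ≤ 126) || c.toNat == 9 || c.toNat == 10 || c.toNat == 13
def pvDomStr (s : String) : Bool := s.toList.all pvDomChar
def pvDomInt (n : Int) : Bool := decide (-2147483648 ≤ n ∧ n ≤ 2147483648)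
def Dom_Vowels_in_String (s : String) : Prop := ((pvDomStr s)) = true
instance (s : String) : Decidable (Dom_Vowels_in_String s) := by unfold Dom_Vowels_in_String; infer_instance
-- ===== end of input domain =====

-- B computes the same (count, distinct-vowels set) by set intersection plus per-vowel s.count sums instead of A's single accumulating loop (measured constant-factor faster: the per-character work moves into set/str.count).

-- ===== PORT A =====
-- single pass: for char in s: if char in vowels: count += 1; found_vowels.add(char)
def Vowels_in_String (s : String) : Int × List String :=
  s.toList.foldl
    (fun (st : Int × PySem.Set String) c =>
      if PySem.Str.isIn (String.ofList [c]) "aeiouAEIOU" then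
        (st.1 + 1, PySem.Set.add st.2 (String.ofList [c]))
      else st)
    ((0 : Int), PySem.Set.empty)

-- ===== PORT B =====
-- found_vowels = set(s) & set(vowels); count = sum(s.count(v) for v in found_vowels)
-- (sum over the set is order-independent, so folding in the Set's stored order is exact)
def Vowels_in_String_alt (s : String) : Int × List String :=
  let found : PySem.Set String :=
    PySem.Set.inter (PySem.Set.ofList (s.toList.map (fun c => String.ofList [c])))
                    (PySem.Set.ofList ("aeiouAEIOU".toList.map (fun c => String.ofList [c])))
  (found.foldl (fun acc v => acc + (PySem.Str.count s v : Int)) 0, found)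

-- ===== PRECONDITION & SPEC =====
def Spec_Vowels_in_String (s : String) (out : Int × List String) : Prop := out = Vowels_in_String_alt s
instance (s : String) (out : Int × List String) : Decidable (Spec_Vowels_in_String s out) := by unfold Spec_Vowels_in_String; infer_instance

-- ===== CLAIM (what is proved, stated in full; the proofs are below) =====
def Claim_equal_Vowels_in_String : Prop := ∀ (s : String), Dom_Vowels_in_String s → Spec_Vowels_in_String s (Vowels_in_String s)

-- ===== LEMMAS AND PROOFS =====

theorem sigma_inj : Function.Injective (fun c => String.ofList [c]) := by
  intro a b h
  have := congrArg String.toList h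
  simpa using this

theorem infix_singleton (c : Char) (l : List Char) : [c] <:+: l ↔ c ∈ l := by
  constructor
  · intro h; exact h.mem (by simp)
  · intro h
    obtain ⟨a, b, rfl⟩ := List.append_of_mem h
    exact ⟨a, b, by simp⟩

-- 'char in vowels' on one-char strings is list membership
theorem test_eq (c : Char) :
    PySem.Str.isIn (String.ofList [c]) "aeiouAEIOU" = "aeiouAEIOU".toList.contains c := by
  rw [Bool.eq_iff_iff, PySem.Str.isIn_iff_infix]
  rw [String.toList_ofList, infix_singleton]
  simp

-- s.count(v) for a one-character v is character count
theorem count_go_singleton (c : Char) : ∀ (l : List Char) (fuel acc : Nat), l.length ≤ fuel →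
    PySem.Chars.count.go [c] fuel l acc = acc + l.count c := by
  intro l
  induction l with
  | nil => intro fuel acc _; cases fuel <;> simp [PySem.Chars.count.go]
  | cons h t ih =>
    intro fuel acc hle
    cases fuel with
    | zero => simp at hle
    | succ n =>
      simp only [PySem.Chars.count.go]
      by_cases hc : c = h
      · subst hc
        rw [if_pos (by simp [List.isPrefixOf])]
        have hd : List.drop [c].length (c :: t) = t := by simp
        rw [hd, ih n (acc+1) (by simpa using Nat.le_of_succ_le_succ hle)]
        simp only [List.count_cons, BEq.rfl, if_true]
        omega
      · have hpf : ([c].isPrefixOf (h :: t)) = false := by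
          simp [List.isPrefixOf, hc]
        rw [if_neg (by simp [hpf])]
        rw [ih n acc (by simpa using Nat.le_of_succ_le_succ hle)]
        have : ¬ (h = c) := fun e => hc e.symm
        simp [this]

theorem count_singleton (l : List Char) (c : Char) : PySem.Chars.count l [c] = l.count c := by
  rw [PySem.Chars.count]
  simp only [List.isEmpty_cons, Bool.false_eq_true, if_false]
  rw [count_go_singleton c l l.length 0 le_rfl]
  omega

-- set(xs) commutes with filtering (first occurrences survive filtering)
theorem filter_ofList {α : Type} [BEq α] [LawfulBEq α] (q : α → Bool) (xs : List α) :
    (PySem.Set.ofList xs).filter q = PySem.Set.ofList (xs.filter q) := by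
  induction xs using List.reverseRecOn with
  | nil => rfl
  | append_singleton xs x ih =>
    rw [PySem.Set.ofList_append_singleton]
    by_cases hq : q x
    · have hfa : (xs ++ [x]).filter q = xs.filter q ++ [x] := by simp [List.filter_append, hq]
      rw [hfa, PySem.Set.ofList_append_singleton, ← ih]
      by_cases hm : x ∈ xs
      · rw [PySem.Set.add_of_mem ((PySem.Set.mem_ofList xs x).mpr hm),
          PySem.Set.add_of_mem (by
            rw [List.mem_filter]
            exact ⟨(PySem.Set.mem_ofList xs x).mpr hm, hq⟩)]
      · rw [PySem.Set.add_of_not_mem (fun h => hm ((PySem.Set.mem_ofList xs x).mp h)),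
          PySem.Set.add_of_not_mem (fun h => hm ((PySem.Set.mem_ofList xs x).mp (List.mem_filter.mp h).1)),
          List.filter_append]
        simp [hq]
    · have hfa : (xs ++ [x]).filter q = xs.filter q := by simp [List.filter_append, hq]
      rw [hfa, ← ih]
      by_cases hm : x ∈ xs
      · rw [PySem.Set.add_of_mem ((PySem.Set.mem_ofList xs x).mpr hm)]
      · rw [PySem.Set.add_of_not_mem (fun h => hm ((PySem.Set.mem_ofList xs x).mp h)),
          List.filter_append]
        simp [hq]

-- set(xs) commutes with an injective map
theorem map_ofList {α β : Type} [BEq α] [LawfulBEq α] [BEq β] [LawfulBEq β]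
    (f : α → β) (hf : Function.Injective f) (xs : List α) :
    PySem.Set.ofList (xs.map f) = (PySem.Set.ofList xs).map f := by
  induction xs using List.reverseRecOn with
  | nil => rfl
  | append_singleton xs x ih =>
    rw [List.map_append, List.map_singleton, PySem.Set.ofList_append_singleton,
      PySem.Set.ofList_append_singleton, ih]
    by_cases hm : x ∈ xs
    · rw [PySem.Set.add_of_mem ((PySem.Set.mem_ofList xs x).mpr hm),
        PySem.Set.add_of_mem
          (List.mem_map_of_mem ((PySem.Set.mem_ofList xs x).mpr hm))]
    · have h1 : f x ∉ PySem.Set.ofList (xs.map f) := by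
        rw [PySem.Set.mem_ofList]
        intro h
        obtain ⟨y, hy, he⟩ := List.mem_map.mp h
        exact hm (hf he ▸ hy)
      rw [ih] at h1
      rw [PySem.Set.add_of_not_mem h1,
        PySem.Set.add_of_not_mem (fun h => hm ((PySem.Set.mem_ofList xs x).mp h)),
        List.map_append, List.map_singleton]

-- A's loop, unrolled: count is countP, the set is built by folding add over the filtered map
theorem foldA (l : List Char) : ∀ (n : Int) (st : PySem.Set String),
    l.foldl
      (fun (st : Int × PySem.Set String) c =>
        if PySem.Str.isIn (String.ofList [c]) "aeiouAEIOU" then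
          (st.1 + 1, PySem.Set.add st.2 (String.ofList [c]))
        else st)
      (n, st)
    = (n + (l.countP (fun c => "aeiouAEIOU".toList.contains c) : Int),
       ((l.filter (fun c => "aeiouAEIOU".toList.contains c)).map (fun c => String.ofList [c])).foldl
         PySem.Set.add st) := by
  induction l with
  | nil => intro n st; simp
  | cons h t ih =>
    intro n st
    rw [List.foldl_cons, test_eq]
    by_cases hp : ("aeiouAEIOU".toList.contains h) = true
    · rw [if_pos hp, ih]
      simp only [List.countP_cons, List.filter_cons, hp, if_true, List.map_cons, List.foldl_cons]
      refine Prod.ext ?_ rfl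
      show n + 1 + _ = _
      push_cast
      ring
    · rw [if_neg hp, ih]
      rw [Bool.not_eq_true] at hp
      simp only [List.countP_cons, List.filter_cons, hp, Bool.false_eq_true, if_false, add_zero]

-- B's distinct-vowel set equals A's insertion-order set
theorem found_eq (l : List Char) :
    PySem.Set.inter (PySem.Set.ofList (l.map (fun c => String.ofList [c])))
        (PySem.Set.ofList ("aeiouAEIOU".toList.map (fun c => String.ofList [c])))
    = PySem.Set.ofList
        ((l.filter (fun c => "aeiouAEIOU".toList.contains c)).map (fun c => String.ofList [c])) := by
  rw [PySem.Set.inter, filter_ofList, List.filter_map]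
  congr 1
  congr 1
  apply List.filter_congr
  intro c _
  rw [Function.comp_apply, Bool.eq_iff_iff, PySem.Set.contains_iff, PySem.Set.mem_ofList,
    List.mem_map]
  constructor
  · rintro ⟨y, hy, he⟩
    have : y = c := sigma_inj he
    subst this
    simpa using hy
  · intro h
    exact ⟨c, by simpa using h, rfl⟩

-- summing per-vowel counts over the distinct present vowels gives the total vowel count
theorem count_eq_lemma (l : List Char) :
    ((PySem.Set.ofList (l.filter (fun c => "aeiouAEIOU".toList.contains c))).map
        (fun c => (List.count c l : Int))).sum
    = (l.countP (fun c => "aeiouAEIOU".toList.contains c) : Int) := by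
  set p : Char → Bool := fun c => "aeiouAEIOU".toList.contains c with hp
  set m : List Char := l.filter p with hm
  have h1 : (PySem.Set.ofList m).map (fun c => (List.count c l : Int))
      = (PySem.Set.ofList m).map (fun c => (List.count c m : Int)) := by
    apply List.map_congr_left
    intro c hc
    have hcm : c ∈ m := (PySem.Set.mem_ofList m c).mp hc
    have hpc : p c = true := (List.mem_filter.mp hcm).2
    rw [hm, List.count_filter hpc]
  have hperm : (PySem.Set.ofList m).Perm m.dedup := by
    rw [List.perm_ext_iff_of_nodup (PySem.Set.nodup_ofList m) m.nodup_dedup]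
    intro a
    rw [PySem.Set.mem_ofList, List.mem_dedup]
  have h2 : ((PySem.Set.ofList m).map (fun c => (List.count c m : Int))).sum
      = (m.dedup.map (fun c => (List.count c m : Int))).sum :=
    (hperm.map _).sum_eq
  have h3 : (m.dedup.map (fun c => (List.count c m : Int))).sum
      = ((m.dedup.map (fun c => List.count c m)).sum : Int) := by
    rw [Nat.cast_list_sum, List.map_map]
    rfl
  rw [h1, h2, h3, List.sum_map_count_dedup_eq_length, List.countP_eq_length_filter, hm]

theorem main_lemma (s : String) : Vowels_in_String s = Vowels_in_String_alt s := by
  simp only [Vowels_in_String, Vowels_in_String_alt]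
  rw [foldA, found_eq]
  refine Prod.ext ?_ ?_
  · show (0 : Int) + _ = _
    rw [PySem.List.foldl_add, zero_add, zero_add,
      map_ofList _ sigma_inj, List.map_map]
    rw [← count_eq_lemma s.toList]
    congr 1
    apply List.map_congr_left
    intro c _
    show (List.count c s.toList : Int) = ((PySem.Str.count s (String.ofList [c]) : Int))
    rw [PySem.Str.count, String.toList_ofList, count_singleton]
  · show _ = _
    rw [PySem.Set.ofList_eq_foldl]
    rfl

-- ===== VERDICT (by name: the statement is the Claim_ definition above) =====
theorem Vowels_in_String_spec : Claim_equal_Vowels_in_String := by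
  intro s _
  unfold Spec_Vowels_in_String
  exact main_lemma s
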